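-- pv_equiv track=rewrite | github.com/mlhill35/kmer-analysis-tool | src/kmer_functions_3.py | find_kmers
-- ===== SOURCE A (Python) =====
-- def find_kmers(sequence, k):
--     kmers = {}
--     length = len(sequence)
--     # iterates through the sequence to extract k-mers
--     for i in range(length - k + 1):
--         kmer = sequence[i:i+k]
--         next_index = i + 1
--         # checks if there is a subsequent k-mer to consider
--         if next_index < length - k + 1:
--             next_kmer = sequence[next_index:next_index+k]
--             # adds the subsequent k-mer to the set associated with the k-mer key
--             kmers.setdefault(kmer, set()).add(next_kmer)
--         elif kmer not in kmers:
--             # adds the last k-mer with an empty set if it has not been added yet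
--             kmers[kmer] = set()
--     return kmers
-- ===== SOURCE B (Python) =====
-- def find_kmers(sequence, k):
--     # Grouping approach: for each distinct k-mer (first-occurrence order), gather
--     # the set of its successors in one scan over all adjacent positions.
--     n = len(sequence) - k + 1
--     kmers = [sequence[i:i+k] for i in range(n)]
--     result = {}
--     for km in kmers:
--         if km not in result:
--             result[km] = {kmers[j + 1] for j in range(n - 1) if kmers[j] == km}
--     return result
-- ===== Notes on version B (the rewrite author's own statement) =====
-- stated objective: alternative
-- what changed: B replaces A's single incremental pass (growing each successor set as the scan meets it) by a grouping algorithm: it iterates over distinct k-mers in first-occurrence order and, for each, computes its whole successor set with a dedicated scan over all adjacent positions.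
import Mathlib
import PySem

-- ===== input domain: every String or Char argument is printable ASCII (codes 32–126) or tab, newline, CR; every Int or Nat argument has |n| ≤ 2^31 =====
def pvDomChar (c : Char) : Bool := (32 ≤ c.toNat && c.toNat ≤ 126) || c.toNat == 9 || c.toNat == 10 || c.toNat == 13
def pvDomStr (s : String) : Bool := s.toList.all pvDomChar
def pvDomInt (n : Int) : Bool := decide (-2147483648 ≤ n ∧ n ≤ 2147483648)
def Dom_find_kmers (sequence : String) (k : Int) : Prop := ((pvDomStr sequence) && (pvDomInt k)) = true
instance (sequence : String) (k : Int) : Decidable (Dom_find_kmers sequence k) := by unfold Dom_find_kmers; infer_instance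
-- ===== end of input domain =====

-- B groups by distinct k-mer (one successor-gathering scan per key) instead of A's single incremental pass (objective: alternative).


-- ===== PORT A =====
def find_kmers (sequence : String) (k : Int) : List (String × List String) :=
  let length : Int := PySem.Str.len sequence
  ((PySem.List.pyRange 0 (length - k + 1) 1).foldl
    (fun (kmers : PySem.Dict String (PySem.Set String)) i =>
      let kmer := PySem.Str.slice sequence (some i) (some (i + k))
      let next_index := i + 1
      if next_index < length - k + 1 then
        let next_kmer := PySem.Str.slice sequence (some next_index) (some (next_index + k))
        -- kmers.setdefault(kmer, set()).add(next_kmer): mutates the set stored at kmer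
        kmers.modify kmer PySem.Set.empty (fun s => PySem.Set.add s next_kmer)
      else if !(kmers.contains kmer) then
        kmers.insert kmer PySem.Set.empty
      else kmers)
    PySem.Dict.empty).items

-- ===== PORT B =====
def find_kmers_alt (sequence : String) (k : Int) : List (String × List String) :=
  let n : Int := PySem.Str.len sequence - k + 1
  let kmersL := (PySem.List.pyRange 0 n 1).map
      (fun i => PySem.Str.slice sequence (some i) (some (i + k)))
  (kmersL.foldl
    (fun (result : PySem.Dict String (PySem.Set String)) km =>
      if !(result.contains km) then
        -- {kmers[j+1] for j in range(n-1) if kmers[j] == km}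
        result.insert km
          ((PySem.List.pyRange 0 (n - 1) 1).foldl
            (fun (s : PySem.Set String) j =>
              if PySem.List.pyGetD kmersL j "" == km then
                PySem.Set.add s (PySem.List.pyGetD kmersL (j + 1) "")
              else s)
            PySem.Set.empty)
      else result)
    PySem.Dict.empty).items

-- ===== PRECONDITION & SPEC =====
def Spec_find_kmers (sequence : String) (k : Int) (out : List (String × List String)) : Prop := out = find_kmers_alt sequence k
instance (sequence : String) (k : Int) (out : List (String × List String)) : Decidable (Spec_find_kmers sequence k out) := by unfold Spec_find_kmers; infer_instance

-- ===== CLAIM (what is proved, stated in full; the proofs are below) =====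
def Claim_equal_find_kmers : Prop := ∀ (sequence : String) (k : Int), Dom_find_kmers sequence k → Spec_find_kmers sequence k (find_kmers sequence k)

-- ===== LEMMAS AND PROOFS =====

lemma getD_modfold (g : Nat → String) (l : List Nat) (d : PySem.Dict String (PySem.Set String)) (x : String) :
    (l.foldl (fun d j => d.modify (g j) PySem.Set.empty (fun s => PySem.Set.add s (g (j+1)))) d).getD x PySem.Set.empty
    = l.foldl (fun s j => if g j == x then PySem.Set.add s (g (j+1)) else s) (d.getD x PySem.Set.empty) := by
  induction l generalizing d with
  | nil => rfl
  | cons j t ih =>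
    simp only [List.foldl_cons]
    rw [ih, PySem.Dict.getD_modify]
    by_cases h : x = g j
    · subst h; simp
    · rw [if_neg h, if_neg (by simpa [beq_iff_eq] using Ne.symm h)]

lemma get?_groupfold (S : String → PySem.Set String) (l : List String) (d : PySem.Dict String (PySem.Set String)) (x : String) :
    (l.foldl (fun d km => if !(d.contains km) then d.insert km (S km) else d) d).get? x
    = if d.contains x then d.get? x else if x ∈ l then some (S x) else none := by
  induction l generalizing d with
  | nil => simp [PySem.Dict.get?_eq_none_iff_contains]
  | cons km t ih =>
    simp only [List.foldl_cons]
    by_cases hc : d.contains km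
    · rw [if_neg (by simp [hc]), ih]
      by_cases hx : d.contains x
      · simp [hx]
      · have hne : x ≠ km := fun h => hx (h ▸ hc)
        simp [hx, hne]
    · rw [if_pos (by simp [hc]), ih]
      by_cases hx : x = km
      · subst hx
        simp [PySem.Dict.contains_insert_self, PySem.Dict.get?_insert_self,
          (by simp [hc] : d.contains x = false)]
      · rw [PySem.Dict.get?_insert_of_ne _ _ hx,
          (by simp [PySem.Dict.contains_insert, hx] : (d.insert km (S km)).contains x = d.contains x)]
        by_cases hdx : d.contains x
        · simp [hdx]
        · simp [hdx, hx]

lemma keys_groupfold (S : String → PySem.Set String) (l : List String) (d : PySem.Dict String (PySem.Set String)) :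
    (l.foldl (fun d km => if !(d.contains km) then d.insert km (S km) else d) d).keys
    = PySem.Set.update d.keys l := by
  induction l generalizing d with
  | nil => rfl
  | cons km t ih =>
    simp only [List.foldl_cons]
    by_cases hc : d.contains km
    · rw [if_neg (by simp [hc]), ih]
      have h1 : PySem.Set.add d.keys km = d.keys := by
        have := (PySem.Dict.contains_iff_mem_keys d km).mp hc
        simp [PySem.Set.add, this]
      simp [PySem.Set.update, h1]
    · rw [if_pos (by simp [hc]), ih,
        PySem.Dict.keys_insert_of_not_contains _ _ (by simpa using hc)]
      have h1 : PySem.Set.add d.keys km = d.keys ++ [km] := by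
        have : ¬ km ∈ d.keys := fun h => hc ((PySem.Dict.contains_iff_mem_keys d km).mpr h)
        simp [PySem.Set.add, this]
      simp [PySem.Set.update, h1]

lemma foldl_if_none (g : Nat → String) (x : String) (l : List Nat) (init : PySem.Set String)
    (h : ∀ j ∈ l, g j ≠ x) :
    l.foldl (fun s j => if g j == x then PySem.Set.add s (g (j+1)) else s) init = init := by
  induction l generalizing init with
  | nil => rfl
  | cons j t ih =>
    simp only [List.foldl_cons]
    rw [if_neg (by simpa [beq_iff_eq] using h j (by simp)), ih]
    intro a ha; exact h a (by simp [ha])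

lemma ofList_append_singleton {α : Type} [BEq α] (l : List α) (a : α) :
    PySem.Set.ofList (l ++ [a]) = PySem.Set.add (PySem.Set.ofList l) a := by
  rw [PySem.Set.ofList_eq_foldl, PySem.Set.ofList_eq_foldl, List.foldl_append]
  rfl

lemma main_group (g : Nat → String) (m : Nat) :
    ((List.range m).foldl
      (fun (d : PySem.Dict String (PySem.Set String)) j =>
        if j + 1 < m then d.modify (g j) PySem.Set.empty (fun s => PySem.Set.add s (g (j+1)))
        else if !(d.contains (g j)) then d.insert (g j) PySem.Set.empty else d)
      PySem.Dict.empty)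
    = (((List.range m).map g).foldl
        (fun (d : PySem.Dict String (PySem.Set String)) km =>
          if !(d.contains km) then
            d.insert km ((List.range (m-1)).foldl
              (fun s j => if g j == km then PySem.Set.add s (g (j+1)) else s) PySem.Set.empty)
          else d)
        PySem.Dict.empty) := by
  cases m with
  | zero => rfl
  | succ t =>
    simp only [Nat.add_sub_cancel]
    set S : String → PySem.Set String := fun km =>
      (List.range t).foldl (fun s j => if g j == km then PySem.Set.add s (g (j+1)) else s) PySem.Set.empty with hS
    set D1 : PySem.Dict String (PySem.Set String) :=
      (List.range t).foldl (fun d j => d.modify (g j) PySem.Set.empty (fun s => PySem.Set.add s (g (j+1)))) PySem.Dict.empty with hD1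
    -- LHS reduces to: last step applied to D1
    have hL : (List.range (t+1)).foldl
        (fun (d : PySem.Dict String (PySem.Set String)) j =>
          if j + 1 < t+1 then d.modify (g j) PySem.Set.empty (fun s => PySem.Set.add s (g (j+1)))
          else if !(d.contains (g j)) then d.insert (g j) PySem.Set.empty else d)
        PySem.Dict.empty
        = if !(D1.contains (g t)) then D1.insert (g t) PySem.Set.empty else D1 := by
      rw [List.range_succ, List.foldl_append, List.foldl_cons, List.foldl_nil]
      rw [PySem.List.foldl_congr_mem _ _
        (fun (d : PySem.Dict String (PySem.Set String)) j =>
          d.modify (g j) PySem.Set.empty (fun s => PySem.Set.add s (g (j+1)))) _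
        (by intro acc j hj; rw [if_pos (by have := List.mem_range.mp hj; omega)])]
      rw [if_neg (by omega)]
    rw [hL]
    -- keys facts
    have hkD1 : D1.keys = PySem.Set.ofList ((List.range t).map g) := by
      rw [hD1, PySem.Dict.keys_foldl_modify_key _ g PySem.Set.empty (fun _ j => fun s => PySem.Set.add s (g (j+1)))]
      rw [PySem.Dict.keys_empty, PySem.Set.ofList_eq_foldl]; rfl
    have hcontD1 : ∀ x, D1.contains x = true ↔ x ∈ (List.range t).map g := by
      intro x
      rw [PySem.Dict.contains_iff_mem_keys, hkD1, PySem.Set.mem_ofList]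
    -- getD of LHS
    have hgD1 : ∀ x, D1.getD x PySem.Set.empty = S x := by
      intro x
      rw [hD1, getD_modfold, PySem.Dict.getD_empty]
    -- RHS via get?_groupfold / keys_groupfold
    set R : PySem.Dict String (PySem.Set String) :=
      ((List.range (t+1)).map g).foldl
        (fun d km => if !(d.contains km) then d.insert km (S km) else d) PySem.Dict.empty with hR
    have hRkeys : R.keys = PySem.Set.ofList ((List.range (t+1)).map g) := by
      rw [hR, keys_groupfold, PySem.Dict.keys_empty, PySem.Set.ofList_eq_foldl]; rfl
    have hRgetD : ∀ x, R.getD x PySem.Set.empty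
        = if x ∈ (List.range (t+1)).map g then S x else PySem.Set.empty := by
      intro x
      rw [PySem.Dict.getD_eq_get?_getD, hR, get?_groupfold, PySem.Dict.contains_empty]
      by_cases hx : x ∈ (List.range (t+1)).map g <;> simp [hx]
    -- the common getD value
    have hSnil : ∀ x, x ∉ (List.range t).map g → S x = PySem.Set.empty := by
      intro x hx
      rw [hS]
      exact foldl_if_none g x _ _ (by
        intro j hj h
        exact hx (by simpa using ⟨j, List.mem_range.mp hj, h⟩))
    -- final: items equal via items_eq_map_keys
    have hLkeys : (if !(D1.contains (g t)) then D1.insert (g t) PySem.Set.empty else D1).keys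
        = PySem.Set.ofList ((List.range (t+1)).map g) := by
      by_cases hc : D1.contains (g t)
      · rw [if_neg (by simp [hc]), hkD1]
        have hmem : g t ∈ (List.range t).map g := (hcontD1 _).mp hc
        rw [List.range_succ, List.map_append, List.map_singleton, ofList_append_singleton]
        simp [PySem.Set.add, PySem.Set.mem_ofList, hmem]
      · rw [if_pos (by simp [hc]),
          PySem.Dict.keys_insert_of_not_contains _ _ (by simpa using hc), hkD1]
        rw [List.range_succ, List.map_append, List.map_singleton, ofList_append_singleton]
        have hmem : g t ∉ (List.range t).map g := fun h => (by simp [(hcontD1 _).mpr h] at hc)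
        simp [PySem.Set.add, PySem.Set.mem_ofList, hmem]
    have hLgetD : ∀ x, (if !(D1.contains (g t)) then D1.insert (g t) PySem.Set.empty else D1).getD x PySem.Set.empty
        = if x ∈ (List.range (t+1)).map g then S x else PySem.Set.empty := by
      intro x
      by_cases hc : D1.contains (g t)
      · rw [if_neg (by simp [hc]), hgD1]
        by_cases hx : x ∈ (List.range (t+1)).map g
        · rw [if_pos hx]
        · rw [if_neg hx]
          exact hSnil x (fun h => hx (by rw [List.range_succ, List.map_append]; exact List.mem_append_left _ h))
      · rw [if_pos (by simp [hc]), PySem.Dict.getD_insert]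
        by_cases hxe : x = g t
        · subst hxe
          rw [if_pos rfl, if_pos (by simp [List.range_succ]),
            (hSnil _ (fun h => hc ((hcontD1 _).mpr h))).symm]
        · rw [if_neg hxe, hgD1]
          by_cases hx : x ∈ (List.range (t+1)).map g
          · rw [if_pos hx]
          · rw [if_neg hx]
            exact hSnil x (fun h => hx (by rw [List.range_succ, List.map_append]; exact List.mem_append_left _ h))
    apply PySem.Dict.ext
    rw [PySem.Dict.items_eq_map_keys _ (by rw [hLkeys]; exact PySem.Set.nodup_ofList _) PySem.Set.empty,
      PySem.Dict.items_eq_map_keys _ (by rw [hRkeys]; exact PySem.Set.nodup_ofList _) PySem.Set.empty,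
      hLkeys, hRkeys]
    apply List.map_congr_left
    intro x hx
    rw [hLgetD, hRgetD]

def gSeq (sequence : String) (k : Int) (j : Nat) : String :=
  PySem.Str.slice sequence (some (j:Int)) (some ((j:Int) + k))

def mN (sequence : String) (k : Int) : Nat := (PySem.Str.len sequence - k + 1).toNat

lemma portA_norm (sequence : String) (k : Int) :
    find_kmers sequence k =
    ((List.range (mN sequence k)).foldl
      (fun (d : PySem.Dict String (PySem.Set String)) j =>
        if j + 1 < mN sequence k then
          d.modify (gSeq sequence k j) PySem.Set.empty
            (fun s => PySem.Set.add s (gSeq sequence k (j+1)))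
        else if !(d.contains (gSeq sequence k j)) then
          d.insert (gSeq sequence k j) PySem.Set.empty
        else d)
      PySem.Dict.empty).items := by
  unfold find_kmers mN
  simp only [PySem.List.pyRange_one, sub_zero, List.foldl_map, zero_add]
  congr 1
  apply PySem.List.foldl_congr_mem
  intro acc j hj
  have hj' : j < (PySem.Str.len sequence - k + 1).toNat := List.mem_range.mp hj
  have hcast : ((j+1 : Nat) : Int) = (j : Int) + 1 := by push_cast; ring
  have hiff : ((j:Int) + 1 < PySem.Str.len sequence - k + 1) ↔ (j + 1 < (PySem.Str.len sequence - k + 1).toNat) := by omega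
  by_cases h : j + 1 < (PySem.Str.len sequence - k + 1).toNat
  · rw [if_pos (hiff.mpr h), if_pos h]
    unfold gSeq
    rw [hcast]
  · rw [if_neg (fun hh => h (hiff.mp hh)), if_neg h]
    rfl

lemma portB_norm (sequence : String) (k : Int) :
    find_kmers_alt sequence k =
    (((List.range (mN sequence k)).map (gSeq sequence k)).foldl
      (fun (d : PySem.Dict String (PySem.Set String)) km =>
        if !(d.contains km) then
          d.insert km ((List.range (mN sequence k - 1)).foldl
            (fun s j => if gSeq sequence k j == km then PySem.Set.add s (gSeq sequence k (j+1)) else s)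
            PySem.Set.empty)
        else d)
      PySem.Dict.empty).items := by
  unfold find_kmers_alt
  have hGet : ∀ (j : Nat), j < mN sequence k →
      PySem.List.pyGetD ((List.range (mN sequence k)).map (gSeq sequence k)) (j : Int) ""
        = gSeq sequence k j := by
    intro j hj
    rw [PySem.List.pyGetD_natCast, PySem.List.getD_map_range _ _ _ _ hj]
  have hK : (PySem.List.pyRange 0 (PySem.Str.len sequence - k + 1) 1).map
      (fun i => PySem.Str.slice sequence (some i) (some (i + k)))
      = (List.range (mN sequence k)).map (gSeq sequence k) := by
    rw [PySem.List.pyRange_one, List.map_map]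
    unfold mN gSeq
    simp only [sub_zero, Function.comp_def, zero_add]
  simp only [hK]
  congr 1
  apply PySem.List.foldl_congr_mem
  intro acc km _
  by_cases hc : acc.contains km
  · simp [hc]
  · rw [if_pos (by simp [hc]), if_pos (by simp [hc])]
    congr 1
    rw [PySem.List.pyRange_one]
    simp only [sub_zero, List.foldl_map, zero_add]
    have hm1 : (PySem.Str.len sequence - k + 1 - 1).toNat = mN sequence k - 1 := by
      unfold mN; omega
    rw [hm1]
    apply PySem.List.foldl_congr_mem
    intro s j hj
    have hj' : j < mN sequence k - 1 := List.mem_range.mp hj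
    have hcast : ((j+1 : Nat) : Int) = (j : Int) + 1 := by push_cast; ring
    rw [hGet j (by omega), ← hcast, hGet (j+1) (by omega)]

-- ===== VERDICT (by name: the statement is the Claim_ definition above) =====
theorem find_kmers_spec : Claim_equal_find_kmers := by
  intro sequence k _
  unfold Spec_find_kmers
  rw [portA_norm, portB_norm]
  congr 1
  exact main_group (gSeq sequence k) (mN sequence k)
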